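-- pv_equiv track=rewrite | github.com/Reigo666/Leetcode | Reigo/leetcode/Python/1807. 替换字符串中的括号内容.py | evaluate
-- ===== SOURCE A (Python) =====
-- from typing import List
--
-- def evaluate(s: str, knowledge: List[List[str]]) -> str:
--     dict={}
--     for kn in knowledge:
--         k,v=kn
--         dict[k]=v
--
--     ans=""
--     r=0
--     while r<len(s):
--         if s[r]!='(':
--             ans+=s[r]
--         else:
--             templ=r
--             while s[r]!=')':
--                 r+=1
--             if s[templ+1:r] in dict:
--                 ans+=dict[s[templ+1:r]]
--             else:
--                 ans+='?'
--         r+=1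
--     return ans
-- ===== SOURCE B (Python) =====
-- def evaluate(s, knowledge):
--     d = dict(knowledge)
--     out = []
--     rest = s
--     while '(' in rest:
--         head, _, tail = rest.partition('(')
--         key, _, rest = tail.partition(')')
--         out.append(head)
--         out.append(d.get(key, '?'))
--     return ''.join(out) + rest
-- ===== Notes on version B (the rewrite author's own statement) =====
-- stated objective: idiomatic
-- what changed: A scans character by character with an index pointer and an inner while hunting for ')'; B repeatedly partitions the string at '(' and ')' (str.partition) and joins the pieces, with no index arithmetic.
import Mathlib
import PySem

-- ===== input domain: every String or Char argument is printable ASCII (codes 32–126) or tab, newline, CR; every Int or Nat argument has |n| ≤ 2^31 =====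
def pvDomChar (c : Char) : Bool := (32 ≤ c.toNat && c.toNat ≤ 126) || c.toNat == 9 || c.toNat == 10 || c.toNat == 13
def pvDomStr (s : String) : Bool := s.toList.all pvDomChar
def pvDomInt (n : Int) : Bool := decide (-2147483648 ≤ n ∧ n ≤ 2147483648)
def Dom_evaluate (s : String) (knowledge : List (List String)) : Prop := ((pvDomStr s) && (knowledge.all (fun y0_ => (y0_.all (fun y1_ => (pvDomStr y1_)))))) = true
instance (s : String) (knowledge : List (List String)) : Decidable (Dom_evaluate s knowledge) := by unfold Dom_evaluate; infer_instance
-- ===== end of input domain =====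

-- B replaces A's char-by-char index scan (manual inner while hunting for ')') by repeated
-- string partition at '(' / ')' — a different, more idiomatic decomposition (no speed claim).

-- ===== PORT A =====
-- shared helper: both Pythons build the same key→value dict (A's loop 'k,v=kn; dict[k]=v' is dict(knowledge));
-- a row whose length is not 2 makes both Pythons raise (outside Pre_), so the '| _ => d' fallback is never
-- reached on admitted inputs
def buildDict (knowledge : List (List String)) : PySem.Dict String String :=
  knowledge.foldl (fun d kn => match kn with | [k, v] => d.insert k v | _ => d) PySem.Dict.empty

-- inner while: 'while s[r] != ')': r += 1'; fuel only makes the loop total (call sites pass fuel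
-- ≥ cs.length + 1 ≥ number of steps); running past the end is Python's IndexError, excluded by Pre_
def findClose (cs : List Char) : Nat → Nat → Nat
  | 0, r => r
  | fuel + 1, r =>
    if h : r < cs.length then
      if cs[r] = ')' then r else findClose cs fuel (r + 1)
    else r

-- outer while over the index r, accumulating ans; s[templ+1:r] with 0 ≤ templ+1 ≤ r is drop/take
-- (PySem.List.slice_natCast); fuel only makes the loop total (r grows by ≥ 1 per iteration)
def loopA (cs : List Char) (d : PySem.Dict String String) : Nat → Nat → List Char → List Char
  | 0, _, ans => ans
  | fuel + 1, r, ans =>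
    if h : r < cs.length then
      if cs[r] ≠ '(' then
        loopA cs d fuel (r + 1) (ans ++ [cs[r]])
      else
        let rc := findClose cs (cs.length + 1) r
        let key := (cs.drop (r + 1)).take (rc - (r + 1))
        loopA cs d fuel (rc + 1) (ans ++ (d.getD (String.ofList key) "?").toList)
    else ans

def evaluate (s : String) (knowledge : List (List String)) : String :=
  String.ofList (loopA s.toList (buildDict knowledge) (s.toList.length + 1) 0 [])

-- ===== PORT B =====
-- 'while '(' in rest: head,_,tail = rest.partition('('); key,_,rest = tail.partition(')')'
-- (partition at a 1-char separator = takeWhile/dropWhile — exact); fuel only makes the loop total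
-- (each iteration consumes the '(' and more, so fuel = |s| + 1 is never exhausted)
def loopB (d : PySem.Dict String String) : Nat → List Char → List (List Char) → List Char
  | 0, rest, out => out.flatten ++ rest
  | fuel + 1, rest, out =>
    if '(' ∈ rest then
      let head := rest.takeWhile (· != '(')
      let tail := (rest.dropWhile (· != '(')).drop 1
      let key := tail.takeWhile (· != ')')
      let rest' := (tail.dropWhile (· != ')')).drop 1
      loopB d fuel rest' (out ++ [head, (d.getD (String.ofList key) "?").toList])
    else out.flatten ++ rest            -- ''.join(out) + rest

def evaluate_alt (s : String) (knowledge : List (List String)) : String :=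
  String.ofList (loopB (buildDict knowledge) (s.toList.length + 1) s.toList [])

-- ===== PRECONDITION & SPEC =====
-- Pre_ excludes exactly the inputs on which Python A raises: a knowledge row whose length is not 2
-- ('k,v=kn' raises ValueError) and a '(' with no later ')' (the inner while runs past the end: IndexError)
def Pre_evaluate (s : String) (knowledge : List (List String)) : Prop :=
  (∀ kn ∈ knowledge, kn.length = 2) ∧
  (∀ t ∈ s.toList.tails, t.head? = some '(' → ')' ∈ t.tail)

instance (s : String) (knowledge : List (List String)) : Decidable (Pre_evaluate s knowledge) := by
  unfold Pre_evaluate; infer_instance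

def pvWitness_evaluate : String × List (List String) := ("hi(a)x(q)", [["a", "VAL"]])

def Spec_evaluate (s : String) (knowledge : List (List String)) (out : String) : Prop := out = evaluate_alt s knowledge
instance (s : String) (knowledge : List (List String)) (out : String) : Decidable (Spec_evaluate s knowledge out) := by unfold Spec_evaluate; infer_instance

-- ===== CLAIM (what is proved, stated in full; the proofs are below) =====
def Claim_equal_evaluate : Prop := ∀ (s : String) (knowledge : List (List String)), Dom_evaluate s knowledge → Pre_evaluate s knowledge → Spec_evaluate s knowledge (evaluate s knowledge)


-- ===== LEMMAS AND PROOFS =====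

-- one partition round strictly shrinks a string containing '('
theorem partitionStep_lt (rest : List Char) (h : '(' ∈ rest) :
    ((((rest.dropWhile (· != '(')).drop 1).dropWhile (· != ')')).drop 1).length < rest.length := by
  have h1 : rest.dropWhile (· != '(') ≠ [] := by
    intro hnil
    have := List.dropWhile_eq_nil_iff.mp hnil '(' h
    simp at this
  have h2 := List.length_dropWhile_le (· != '(') rest
  have h3 := List.length_dropWhile_le (· != ')') ((rest.dropWhile (· != '(')).drop 1)
  have h4 : 0 < (rest.dropWhile (· != '(')).length := List.length_pos_iff.mpr h1
  simp only [List.length_drop] at *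
  omega

-- loopB does not depend on the fuel once it covers the length of rest
theorem loopB_fuel (d : PySem.Dict String String) :
    ∀ (f1 f2 : Nat) (rest : List Char) (out : List (List Char)),
      rest.length ≤ f1 → rest.length ≤ f2 → loopB d f1 rest out = loopB d f2 rest out := by
  intro f1
  induction f1 with
  | zero =>
    intro f2 rest out hf1 _
    have : rest = [] := List.eq_nil_of_length_eq_zero (by omega)
    subst this
    cases f2 <;> simp [loopB]
  | succ f ih =>
    intro f2 rest out hf1 hf2
    cases f2 with
    | zero =>
      have : rest = [] := List.eq_nil_of_length_eq_zero (by omega)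
      subst this
      simp [loopB]
    | succ g =>
      by_cases h : '(' ∈ rest
      · have hlt := partitionStep_lt rest h
        simp only [loopB, if_pos h]
        exact ih g _ _ (by omega) (by omega)
      · simp [loopB, h]

-- the accumulator of loopB only ever gets prepended (join distributes)
theorem loopB_acc (d : PySem.Dict String String) :
    ∀ (fuel : Nat) (rest : List Char) (out : List (List Char)),
      loopB d fuel rest out = out.flatten ++ loopB d fuel rest [] := by
  intro fuel
  induction fuel with
  | zero => intro rest out; simp [loopB]
  | succ f ih =>
    intro rest out
    by_cases h : '(' ∈ rest
    · simp only [loopB, if_pos h]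
      rw [ih _ (out ++ _), ih _ ([] ++ _)]
      simp [List.flatten_append]
    · simp [loopB, h]

-- peeling one non-'(' character off the front of loopB's input
theorem loopB_cons_ne (d : PySem.Dict String String) (fuel : Nat) (c : Char) (rest : List Char)
    (hc : c ≠ '(') :
    loopB d (fuel + 1) (c :: rest) [] = c :: loopB d (fuel + 1) rest [] := by
  by_cases h : '(' ∈ rest
  · have h' : '(' ∈ c :: rest := List.mem_cons_of_mem _ h
    simp only [loopB, if_pos h', if_pos h]
    rw [List.takeWhile_cons_of_pos (by simpa using hc),
        List.dropWhile_cons_of_pos (by simpa using hc)]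
    rw [loopB_acc, loopB_acc d fuel _ ([] ++ _)]
    simp
  · have h' : '(' ∉ c :: rest := by simp [h, Ne.symm hc]
    simp [loopB, h, h']

-- the inner while of A lands on the first ')' at or after r (when one exists)
theorem findClose_spec (cs : List Char) :
    ∀ (fuel r : Nat), cs.length ≤ fuel + r → ')' ∈ cs.drop r →
      findClose cs fuel r = r + ((cs.drop r).takeWhile (· != ')')).length ∧
      findClose cs fuel r < cs.length := by
  intro fuel
  induction fuel with
  | zero =>
    intro r hf hmem
    rw [List.drop_eq_nil_of_le (by omega)] at hmem
    simp at hmem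
  | succ f ih =>
    intro r hf hmem
    have hr : r < cs.length := by
      by_contra hh
      rw [List.drop_eq_nil_of_le (by omega)] at hmem
      simp at hmem
    have hdr : cs.drop r = cs[r] :: cs.drop (r + 1) := List.drop_eq_getElem_cons hr
    by_cases hc : cs[r] = ')'
    · refine ⟨?_, ?_⟩
      · simp only [findClose, dif_pos hr, if_pos hc]
        rw [hdr, List.takeWhile_cons_of_neg (by simp [hc])]
        simp
      · simp only [findClose, dif_pos hr, if_pos hc]
        exact hr
    · have hmem' : ')' ∈ cs.drop (r + 1) := by
        rw [hdr] at hmem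
        rcases List.mem_cons.mp hmem with he | hm
        · exact absurd he.symm hc
        · exact hm
      obtain ⟨e1, e2⟩ := ih (r + 1) (by omega) hmem'
      refine ⟨?_, ?_⟩
      · simp only [findClose, dif_pos hr, if_neg hc]
        rw [e1, hdr, List.takeWhile_cons_of_pos (by simp [hc])]
        simp; omega
      · simp only [findClose, dif_pos hr, if_neg hc]
        exact e2

-- the main invariant: A's indexed scan from r equals B's partition loop on the suffix cs.drop r
theorem loopA_eq (cs : List Char) (d : PySem.Dict String String)
    (hwf : ∀ t ∈ cs.tails, t.head? = some '(' → ')' ∈ t.tail) :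
    ∀ (fuel r : Nat) (ans : List Char), cs.length ≤ fuel + r →
      loopA cs d fuel r ans = ans ++ loopB d fuel (cs.drop r) [] := by
  intro fuel
  induction fuel with
  | zero =>
    intro r ans hf
    rw [List.drop_eq_nil_of_le (by omega)]
    simp [loopA, loopB]
  | succ f ih =>
    intro r ans hf
    by_cases hr : r < cs.length
    · have hdr : cs.drop r = cs[r] :: cs.drop (r + 1) := List.drop_eq_getElem_cons hr
      by_cases hc : cs[r] = '('
      · -- '(' segment
        have hmem : cs.drop r ∈ cs.tails := (List.mem_tails _ _).mpr (List.drop_suffix r cs)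
        have hcl : ')' ∈ cs.drop (r + 1) := by
          have h5 := hwf _ hmem (by rw [hdr, hc]; rfl)
          rw [hdr] at h5
          rwa [List.tail_cons] at h5
        have hstep : findClose cs (cs.length + 1) r = findClose cs cs.length (r + 1) := by
          simp only [findClose, dif_pos hr]
          rw [if_neg (by rw [hc]; decide)]
        obtain ⟨e1, e2⟩ := findClose_spec cs cs.length (r + 1) (by omega) hcl
        have hsplit := List.takeWhile_append_dropWhile (p := (· != ')')) (l := cs.drop (r + 1))
        have hkey : (cs.drop (r + 1)).take (((cs.drop (r + 1)).takeWhile (· != ')')).length)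
            = (cs.drop (r + 1)).takeWhile (· != ')') := by
          nth_rewrite 2 [← hsplit]
          exact List.take_left
        have hdrop : (cs.drop (r + 1)).drop (((cs.drop (r + 1)).takeWhile (· != ')')).length)
            = (cs.drop (r + 1)).dropWhile (· != ')') := by
          nth_rewrite 2 [← hsplit]
          exact List.drop_left
        simp only [loopA, dif_pos hr, hstep, e1]
        rw [if_neg (by intro hne; exact hne hc)]
        have harith : r + 1 + ((cs.drop (r + 1)).takeWhile (· != ')')).length - (r + 1)
            = ((cs.drop (r + 1)).takeWhile (· != ')')).length := by omega
        rw [harith, hkey]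
        rw [ih (r + 1 + ((cs.drop (r + 1)).takeWhile (· != ')')).length + 1) _ (by omega)]
        -- right-hand side: unfold loopB one step on '(' :: cs.drop (r+1)
        have hR : cs.drop (r + 1 + ((cs.drop (r + 1)).takeWhile (· != ')')).length + 1)
            = ((cs.drop (r + 1)).dropWhile (· != ')')).drop 1 := by
          conv_rhs => rw [← hdrop, List.drop_drop, List.drop_drop]
          rw [Nat.add_assoc]
        rw [hR, hdr, hc]
        have hin : '(' ∈ '(' :: cs.drop (r + 1) := List.mem_cons_self
        simp only [loopB, if_pos hin, List.takeWhile_cons, List.dropWhile_cons,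
          bne_self_eq_false, Bool.false_eq_true, if_false, List.drop_one, List.tail_cons,
          List.nil_append]
        rw [loopB_acc d f (((cs.drop (r + 1)).dropWhile (· != ')')).tail)
          [[], (d.getD (String.ofList ((cs.drop (r + 1)).takeWhile (· != ')'))) "?").toList]]
        simp
      · -- ordinary character
        simp only [loopA, dif_pos hr, if_pos hc]
        rw [ih (r + 1) _ (by omega), hdr, loopB_cons_ne d f _ _ hc]
        rw [loopB_fuel d (f + 1) f (cs.drop (r + 1)) [] (by simp; omega) (by simp; omega)]
        simp
    · rw [List.drop_eq_nil_of_le (by omega)]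
      simp [loopA, loopB, hr]

-- ===== VERDICT (by name: the statement is the Claim_ definition above) =====
theorem evaluate_spec : Claim_equal_evaluate := by
  intro s knowledge _ hpre
  show evaluate s knowledge = evaluate_alt s knowledge
  unfold evaluate evaluate_alt
  rw [loopA_eq s.toList (buildDict knowledge) hpre.2 (s.toList.length + 1) 0 [] (by omega)]
  simp
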